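-- pv_equiv track=rewrite | github.com/henrique-lego/salience | src/salience/format.py | _map_domains_to_tags
-- ===== SOURCE A (Python) =====
-- def _map_domains_to_tags(
--     domains: list[str], tag_vocab: dict[str, list[str]]
-- ) -> list[str]:
--     """Map bookmark domains to the closest tags from the configured vocabulary."""
--     all_tags = []
--     for tags in tag_vocab.values():
--         all_tags.extend(tags)
--
--     matched: list[str] = []
--     for domain in domains:
--         domain_words = domain.lower().replace("-", " ").split()
--         for tag in all_tags:
--             if tag in matched:
--                 continue
--             tag_words = tag.lower().replace("-", " ").split()
--             if _words_overlap(domain_words, tag_words):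
--                 matched.append(tag)
--     return matched
--
-- def _words_overlap(a_words: list[str], b_words: list[str]) -> bool:
--     """Check if any word from a shares a stem with any word from b.
--
--     Uses prefix matching (min 4 chars) to handle plural/singular variations.
--     """
--     for aw in a_words:
--         for bw in b_words:
--             if aw == bw:
--                 return True
--             # Prefix match for stemming (agent/agents, automate/automation)
--             min_len = min(len(aw), len(bw))
--             if min_len >= 4 and (aw.startswith(bw[:4]) or bw.startswith(aw[:4])):
--                 return True
--     return False
-- ===== SOURCE B (Python) =====
-- def _stem_keys(text: str) -> set[str]:
--     """Key each word by itself if short, else by its 4-char stem prefix.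
--
--     Two words satisfy A's pairwise test (equal, or both >=4 chars with a shared
--     4-char prefix either way) exactly when their keys coincide.
--     """
--     return {w if len(w) < 4 else w[:4] for w in text.lower().replace("-", " ").split()}
--
-- def _map_domains_to_tags(
--     domains: list[str], tag_vocab: dict[str, list[str]]
-- ) -> list[str]:
--     """Map bookmark domains to the closest tags from the configured vocabulary."""
--     all_tags = dict.fromkeys(t for tags in tag_vocab.values() for t in tags)
--     remaining = [(tag, _stem_keys(tag)) for tag in all_tags]
--     matched: list[str] = []
--     for domain in domains:
--         dk = _stem_keys(domain)
--         rest = []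
--         for tag, tk in remaining:
--             if dk & tk:
--                 matched.append(tag)
--             else:
--                 rest.append((tag, tk))
--         remaining = rest
--     return matched
-- ===== Notes on version B (the rewrite author's own statement) =====
-- stated objective: faster
-- what changed: B precomputes one stem-key set per tag (a word keyed by itself if shorter than 4 chars, else by its 4-char prefix) and matches a domain by set intersection, keeping unmatched tags in a shrinking deduplicated 'remaining' list that is partitioned per domain, instead of A's per-domain rescan of all tags with a 'tag in matched' list scan and pairwise startswith tests.
import Mathlib
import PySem

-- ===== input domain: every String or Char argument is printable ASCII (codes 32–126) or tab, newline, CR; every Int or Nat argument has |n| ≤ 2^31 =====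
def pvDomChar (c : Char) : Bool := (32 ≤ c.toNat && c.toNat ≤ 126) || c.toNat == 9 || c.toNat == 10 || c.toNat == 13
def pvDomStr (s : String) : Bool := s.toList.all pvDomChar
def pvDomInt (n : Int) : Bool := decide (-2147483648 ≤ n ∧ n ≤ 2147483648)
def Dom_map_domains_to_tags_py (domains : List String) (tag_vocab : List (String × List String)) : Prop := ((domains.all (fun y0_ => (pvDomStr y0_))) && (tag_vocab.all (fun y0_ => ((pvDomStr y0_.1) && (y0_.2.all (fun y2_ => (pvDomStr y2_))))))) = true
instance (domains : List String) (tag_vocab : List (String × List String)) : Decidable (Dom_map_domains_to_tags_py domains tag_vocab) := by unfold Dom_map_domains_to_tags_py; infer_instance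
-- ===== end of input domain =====

-- B replaces A's pairwise prefix tests and matched-list scans by precomputed stem-key sets
-- per word and a shrinking 'remaining' list of unmatched tags; same return value.


-- ===== PORT A =====
-- text.lower().replace("-", " ").split() — the identical expression appears in both Pythons
def pvWords (s : String) : List String :=
  PySem.Str.split₀ (PySem.Str.replace (PySem.Str.lower s) "-" " ")

-- _words_overlap: nested loops with early 'return True' = any/any
def words_overlap_py (a_words b_words : List String) : Bool :=
  a_words.any (fun aw => b_words.any (fun bw =>
    aw == bw ||
    (decide (4 ≤ min (PySem.Str.len aw) (PySem.Str.len bw)) &&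
      (PySem.Str.startswith aw (PySem.Str.slice bw none (some 4)) ||
       PySem.Str.startswith bw (PySem.Str.slice aw none (some 4))))))

def map_domains_to_tags_py (domains : List String) (tag_vocab : List (String × List String)) : List String :=
  let all_tags := tag_vocab.foldl (fun acc kv => acc ++ kv.2) []
  domains.foldl (fun matched domain =>
    let domain_words := pvWords domain
    all_tags.foldl (fun m tag =>
      if m.contains tag then m
      else if words_overlap_py domain_words (pvWords tag) then m ++ [tag] else m)
      matched) []

-- ===== PORT B =====
-- the key expression of Source B's set comprehension: w if len(w) < 4 else w[:4]
def pvKey (w : String) : String :=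
  if PySem.Str.len w < 4 then w else PySem.Str.slice w none (some 4)

-- _stem_keys: set comprehension over the words
def stem_keys (text : String) : PySem.Set String :=
  PySem.Set.ofList ((pvWords text).map pvKey)

def map_domains_to_tags_py_alt (domains : List String) (tag_vocab : List (String × List String)) : List String :=
  -- dict.fromkeys(generator) = ordered first-occurrence dedup (PySem.List.dedup)
  let all_tags := PySem.List.dedup (tag_vocab.flatMap (fun kv => kv.2))
  let remaining := all_tags.map (fun tag => (tag, stem_keys tag))
  (domains.foldl (fun st domain =>
    let dk := stem_keys domain
    st.2.foldl (fun st2 p =>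
      if !(PySem.Set.inter dk p.2).isEmpty then (st2.1 ++ [p.1], st2.2)
      else (st2.1, st2.2 ++ [p]))
      (st.1, ([] : List (String × PySem.Set String))))
    (([] : List String), remaining)).1

-- ===== PRECONDITION & SPEC =====
def Spec_map_domains_to_tags_py (domains : List String) (tag_vocab : List (String × List String)) (out : List String) : Prop := out = map_domains_to_tags_py_alt domains tag_vocab
instance (domains : List String) (tag_vocab : List (String × List String)) (out : List String) : Decidable (Spec_map_domains_to_tags_py domains tag_vocab out) := by unfold Spec_map_domains_to_tags_py; infer_instance

-- ===== CLAIM (what is proved, stated in full; the proofs are below) =====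
def Claim_equal_map_domains_to_tags_py : Prop := ∀ (domains : List String) (tag_vocab : List (String × List String)), Dom_map_domains_to_tags_py domains tag_vocab → Spec_map_domains_to_tags_py domains tag_vocab (map_domains_to_tags_py domains tag_vocab)

-- ===== LEMMAS AND PROOFS =====

lemma slice4_toList (w : String) :
    (PySem.Str.slice w none (some 4)).toList = w.toList.take 4 := by
  rw [PySem.Str.toList_slice, PySem.Chars.slice_eq_listSlice,
    PySem.List.slice_to _ (by norm_num)]
  rfl

-- A's pairwise word test is exactly equality of B's stem keys
lemma pair_eq (aw bw : String) :
    (aw == bw ||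
      (decide (4 ≤ min (PySem.Str.len aw) (PySem.Str.len bw)) &&
        (PySem.Str.startswith aw (PySem.Str.slice bw none (some 4)) ||
         PySem.Str.startswith bw (PySem.Str.slice aw none (some 4)))))
    = (pvKey aw == pvKey bw) := by
  rw [Bool.eq_iff_iff]
  simp only [Bool.or_eq_true, Bool.and_eq_true, decide_eq_true_eq, beq_iff_eq,
    PySem.Str.len_eq, le_min_iff, PySem.Str.startswith_eq, PySem.Chars.startswith_iff,
    pvKey]
  rw [slice4_toList, slice4_toList]
  have htake : ∀ u v : String, 4 ≤ v.toList.length →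
      (v.toList.take 4 <+: u.toList ↔ v.toList.take 4 = u.toList.take 4) := by
    intro u v hv
    rw [List.prefix_iff_eq_take, List.length_take]
    have h : min 4 v.toList.length = 4 := by omega
    rw [h]
  by_cases h4a : 4 ≤ aw.toList.length <;> by_cases h4b : 4 ≤ bw.toList.length
  · have hR : (PySem.Str.slice aw none (some 4) = PySem.Str.slice bw none (some 4)) ↔
        aw.toList.take 4 = bw.toList.take 4 := by
      rw [← String.toList_inj, slice4_toList, slice4_toList]
    rw [if_neg (by exact_mod_cast not_lt.mpr h4a), if_neg (by exact_mod_cast not_lt.mpr h4b),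
      hR, htake aw bw h4b, htake bw aw h4a]
    constructor
    · rintro (rfl | ⟨-, h | h⟩)
      · rfl
      · exact h.symm
      · exact h
    · intro h
      exact Or.inr ⟨⟨by exact_mod_cast h4a, by exact_mod_cast h4b⟩, Or.inr h⟩
  · rw [if_neg (by exact_mod_cast not_lt.mpr h4a), if_pos (by exact_mod_cast not_le.mp h4b)]
    constructor
    · rintro (rfl | ⟨⟨-, hb⟩, -⟩)
      · exact absurd h4a h4b
      · exact absurd (by exact_mod_cast hb) h4b
    · intro h
      exfalso
      have h1 := congrArg String.toList h
      rw [slice4_toList] at h1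
      have h2 := congrArg List.length h1
      rw [List.length_take] at h2
      omega
  · rw [if_pos (by exact_mod_cast not_le.mp h4a), if_neg (by exact_mod_cast not_lt.mpr h4b)]
    constructor
    · rintro (rfl | ⟨⟨ha, -⟩, -⟩)
      · exact absurd h4b h4a
      · exact absurd (by exact_mod_cast ha) h4a
    · intro h
      exfalso
      have h1 := congrArg String.toList h
      rw [slice4_toList] at h1
      have h2 := congrArg List.length h1
      rw [List.length_take] at h2
      omega
  · rw [if_pos (by exact_mod_cast not_le.mp h4a), if_pos (by exact_mod_cast not_le.mp h4b)]
    constructor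
    · rintro (h | ⟨⟨ha, -⟩, -⟩)
      · exact h
      · exact absurd (by exact_mod_cast ha) h4a
    · exact Or.inl

-- A's overlap test equals B's nonempty-intersection test of the stem-key sets
lemma ov_eq_inter (d t : String) :
    words_overlap_py (pvWords d) (pvWords t)
    = !((PySem.Set.inter (stem_keys d) (stem_keys t)).isEmpty) := by
  rw [Bool.eq_iff_iff]
  simp only [words_overlap_py, List.any_eq_true, pair_eq, beq_iff_eq,
    Bool.not_eq_true', List.isEmpty_eq_false_iff_exists_mem]
  constructor
  · rintro ⟨aw, haw, bw, hbw, h⟩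
    exact ⟨pvKey aw, (PySem.Set.mem_inter _ _ _).mpr
      ⟨(PySem.Set.mem_ofList _ _).mpr (List.mem_map_of_mem haw),
       (PySem.Set.mem_ofList _ _).mpr (h ▸ List.mem_map_of_mem hbw)⟩⟩
  · rintro ⟨x, hx⟩
    obtain ⟨h1, h2⟩ := (PySem.Set.mem_inter _ _ _).mp hx
    obtain ⟨aw, haw, rfl⟩ := List.mem_map.mp ((PySem.Set.mem_ofList _ _).mp h1)
    obtain ⟨bw, hbw, hk⟩ := List.mem_map.mp ((PySem.Set.mem_ofList _ _).mp h2)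
    exact ⟨aw, haw, bw, hbw, hk.symm⟩

-- A's inner loop over all tags appends the not-yet-matched overlapping tags, first occurrences only
lemma innerA_eq (dw : List String) (ts m : List String) :
    ts.foldl (fun m tag => if m.contains tag then m
      else if words_overlap_py dw (pvWords tag) then m ++ [tag] else m) m
    = m ++ (PySem.Set.ofList ts).filter
        (fun t => !m.contains t && words_overlap_py dw (pvWords t)) := by
  induction ts generalizing m with
  | nil => simp [PySem.Set.ofList, PySem.Set.empty]
  | cons t ts ih =>
    rw [List.foldl_cons, PySem.Set.ofList_cons, PySem.Set.discard]
    by_cases hc : m.contains t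
    · have hc' : t ∈ m := by simpa [List.contains_eq_mem] using hc
      rw [if_pos hc, ih, List.filter_cons_of_neg (by simp [hc']), List.filter_filter]
      congr 1
      refine (List.filter_congr ?_).symm
      intro y hy
      by_cases hyt : y = t
      · subst hyt; simp [hc']
      · simp [hyt]
    · have hc' : t ∉ m := by simpa [List.contains_eq_mem] using hc
      by_cases hov : words_overlap_py dw (pvWords t)
      · rw [if_neg hc, if_pos hov, ih,
          List.filter_cons_of_pos (by simp [hc', hov]), List.filter_filter,
          List.append_assoc, List.singleton_append]
        congr 2
        refine List.filter_congr ?_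
        intro y hy
        by_cases hyt : y = t
        · subst hyt
          simp [List.contains_eq_mem]
        · simp [List.contains_eq_mem, hyt]
      · rw [if_neg hc, if_neg hov, ih,
          List.filter_cons_of_neg (by simp [hov]), List.filter_filter]
        congr 1
        refine (List.filter_congr ?_).symm
        intro y hy
        by_cases hyt : y = t
        · subst hyt; simp [hov]
        · simp [hyt]

-- B's inner loop over the remaining (tag, keys) pairs partitions them
lemma innerB_eq (d : String) (l : List String) (acc : List String)
    (rest : List (String × PySem.Set String)) :
    (l.map (fun t => (t, stem_keys t))).foldl
      (fun st2 p => if !(PySem.Set.inter (stem_keys d) p.2).isEmpty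
        then (st2.1 ++ [p.1], st2.2) else (st2.1, st2.2 ++ [p])) (acc, rest)
    = (acc ++ l.filter (fun t => !(PySem.Set.inter (stem_keys d) (stem_keys t)).isEmpty),
       rest ++ (l.filter (fun t => (PySem.Set.inter (stem_keys d) (stem_keys t)).isEmpty)).map
         (fun t => (t, stem_keys t))) := by
  induction l generalizing acc rest with
  | nil => simp
  | cons t ts ih =>
    rw [List.map_cons, List.foldl_cons]
    by_cases h : (PySem.Set.inter (stem_keys d) (stem_keys t)).isEmpty
    · rw [if_neg (by simp [h]), ih,
        List.filter_cons_of_neg (by simp [h]), List.filter_cons_of_pos (by simp [h]),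
        List.map_cons, List.append_assoc, List.singleton_append]
    · rw [if_pos (by simp [h]), ih,
        List.filter_cons_of_pos (by simp [h]), List.filter_cons_of_neg (by simp [h]),
        List.append_assoc, List.singleton_append]

-- main loop invariant: B's remaining list carries exactly the deduped not-yet-matched tags
lemma outer_eq (ds : List String) (ats m : List String) :
    ds.foldl (fun matched domain =>
      ats.foldl (fun m tag => if m.contains tag then m
        else if words_overlap_py (pvWords domain) (pvWords tag) then m ++ [tag] else m)
        matched) m
    = (ds.foldl (fun st domain =>
        st.2.foldl (fun st2 p =>
          if !(PySem.Set.inter (stem_keys domain) p.2).isEmpty then (st2.1 ++ [p.1], st2.2)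
          else (st2.1, st2.2 ++ [p]))
          (st.1, ([] : List (String × PySem.Set String))))
        (m, ((PySem.Set.ofList ats).filter (fun t => !m.contains t)).map
          (fun t => (t, stem_keys t)))).1 := by
  induction ds generalizing m with
  | nil => simp
  | cons d ds ih =>
    rw [List.foldl_cons, List.foldl_cons, innerA_eq (pvWords d) ats m, innerB_eq]
    have hmatched :
        ((PySem.Set.ofList ats).filter (fun t => !m.contains t)).filter
            (fun t => !(PySem.Set.inter (stem_keys d) (stem_keys t)).isEmpty)
          = (PySem.Set.ofList ats).filter
            (fun t => !m.contains t && words_overlap_py (pvWords d) (pvWords t)) := by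
      rw [List.filter_filter]
      refine List.filter_congr ?_
      intro y _
      rw [ov_eq_inter, Bool.and_comm]
    have hrest :
        ((PySem.Set.ofList ats).filter (fun t => !m.contains t)).filter
            (fun t => (PySem.Set.inter (stem_keys d) (stem_keys t)).isEmpty)
          = (PySem.Set.ofList ats).filter
            (fun t => !(m ++ (PySem.Set.ofList ats).filter
              (fun t => !m.contains t && words_overlap_py (pvWords d) (pvWords t))).contains t) := by
      rw [List.filter_filter]
      refine List.filter_congr ?_
      intro y hy
      simp only [List.contains_eq_mem, List.mem_append, List.mem_filter, hy, true_and]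
      rw [ov_eq_inter]
      by_cases hc : m.contains y
      · simp [List.contains_eq_mem] at hc
        simp [hc]
      · simp [List.contains_eq_mem] at hc
        by_cases he : (PySem.Set.inter (stem_keys d) (stem_keys y)).isEmpty
        · simp [hc, he]
        · simp [hc, he]
    rw [hmatched, hrest, ih]
    simp only [List.nil_append]

-- ===== VERDICT (by name: the statement is the Claim_ definition above) =====
theorem map_domains_to_tags_py_spec : Claim_equal_map_domains_to_tags_py := by
  unfold Claim_equal_map_domains_to_tags_py
  intro domains tag_vocab _
  unfold Spec_map_domains_to_tags_py
  simp only [map_domains_to_tags_py, map_domains_to_tags_py_alt]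
  rw [PySem.List.foldl_append_eq_flatMap (fun kv => kv.2) tag_vocab [], List.nil_append]
  rw [outer_eq domains (tag_vocab.flatMap fun kv => kv.2) []]
  have hinit : ((PySem.Set.ofList (tag_vocab.flatMap fun kv => kv.2)).filter
        (fun t => !(List.contains ([] : List String) t))).map (fun t => (t, stem_keys t))
      = (PySem.List.dedup (tag_vocab.flatMap fun kv => kv.2)).map (fun t => (t, stem_keys t)) := by
    rw [PySem.List.dedup, List.filter_eq_self.mpr (by intro a _; simp)]
  rw [hinit]
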